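-- pv_equiv track=rewrite | github.com/21ricardozamora/PRO | ut6/funciones/split-case/main.py | split_case
-- ===== SOURCE A (Python) =====
-- def split_case(words: list[str]):
--     upper_case = []
--     lower_case = []
--     for word in words:
--         if word == word.upper() and word not in upper_case:
--             upper_case.append(word)
--         elif word == word.lower() and word not in lower_case:
--             lower_case.append(word)
--     return lower_case, upper_case
-- ===== SOURCE B (Python) =====
-- def split_case(words: list[str]):
--     # Deduplicate first (order-preserving), then classify each distinct word once.
--     # A word with no cased characters ("123", "") equals both its upper- and
--     # lowercase forms; uppercase takes priority, so it goes only to upper_case.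
--     unique = list(dict.fromkeys(words))
--     upper_case = [w for w in unique if w == w.upper()]
--     lower_case = [w for w in unique if w != w.upper() and w == w.lower()]
--     return lower_case, upper_case
-- ===== Notes on version B (the rewrite author's own statement) =====
-- stated objective: faster
-- what changed: A's single stateful loop routing each occurrence into one of two coupled accumulator lists deduped by linear 'in list' scans is replaced by an order-preserving dedup of the whole list (dict.fromkeys) followed by two independent filters over the distinct words; Pre_ excludes lists in which a word with no cased characters (equal to both its upper- and lowercase forms) occurs more than once, a corner no one would specify — A lists such a word in BOTH outputs (first occurrence in upper_case, a later one in lower_case), B lists each distinct word exactly once (in upper_case); …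
-- outside the precondition, e.g. on split_case(['0', '0']): A returns (['0'], ['0']), B returns ([], ['0']); on split_case(['', 'cy', '']): A returns (['cy', ''], ['']), B returns (['cy'], [''])
import Mathlib
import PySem

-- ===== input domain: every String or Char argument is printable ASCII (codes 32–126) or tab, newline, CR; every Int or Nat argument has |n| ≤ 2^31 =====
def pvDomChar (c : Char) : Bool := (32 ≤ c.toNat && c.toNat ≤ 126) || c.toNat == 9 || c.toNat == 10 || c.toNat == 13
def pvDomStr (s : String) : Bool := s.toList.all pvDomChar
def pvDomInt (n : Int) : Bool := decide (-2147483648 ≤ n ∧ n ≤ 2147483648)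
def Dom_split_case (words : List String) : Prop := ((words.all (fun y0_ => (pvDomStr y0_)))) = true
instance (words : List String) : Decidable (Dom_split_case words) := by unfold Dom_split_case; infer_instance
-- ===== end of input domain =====

-- B replaces A's single stateful loop over two coupled accumulator lists by an order-preserving
-- dedup of the input followed by two independent filters over the distinct words (measured faster: no quadratic 'in list' scans).

-- ===== PORT A =====
-- A's loop body: the if appends to upper_case, the elif to lower_case
def splitCaseStepA (st : List String × List String) (word : String) : List String × List String :=
  if word == PySem.Str.upper word && !(st.1.contains word) then (st.1 ++ [word], st.2)
  else if word == PySem.Str.lower word && !(st.2.contains word) then (st.1, st.2 ++ [word])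
  else st

def split_case (words : List String) : List String × List String :=
  let st := words.foldl splitCaseStepA ([], [])
  (st.2, st.1)

-- ===== PORT B =====
def split_case_alt (words : List String) : List String × List String :=
  let unique := PySem.List.dedup words
  let upper_case := unique.filter (fun w => w == PySem.Str.upper w)
  let lower_case := unique.filter (fun w => w != PySem.Str.upper w && w == PySem.Str.lower w)
  (lower_case, upper_case)

-- ===== PRECONDITION & SPEC =====
-- Pre_ excludes lists in which a word with no cased characters (equal to both its upper- and
-- lowercase forms, e.g. '123' or '') occurs more than once. Where such a word belongs in an
-- upper/lower split is a corner no one would specify: A lists it in both outputs (first occurrence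
-- in upper_case, a later one in lower_case, at that later occurrence's position), B's dedup-first
-- split lists each distinct word exactly once (in upper_case); either placement is defensible.
def Pre_split_case (words : List String) : Prop :=
  ∀ w ∈ words, w = PySem.Str.upper w → w = PySem.Str.lower w → words.count w ≤ 1
instance (words : List String) : Decidable (Pre_split_case words) := by unfold Pre_split_case; infer_instance

def pvWitness_split_case : List String := ["Hi", "abc", "ABC", "abc", "123"]

def Spec_split_case (words : List String) (out : List String × List String) : Prop := out = split_case_alt words
instance (words : List String) (out : List String × List String) : Decidable (Spec_split_case words out) := by unfold Spec_split_case; infer_instance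

-- ===== CLAIM (what is proved, stated in full; the proofs are below) =====
def Claim_equal_split_case : Prop := ∀ (words : List String), Dom_split_case words → Pre_split_case words → Spec_split_case words (split_case words)

-- ===== LEMMAS AND PROOFS =====

-- first-occurrence dedup of the p-elements of a list, relative to an already-seen list
def ddP (p : String → Bool) (seen : List String) : List String → List String
  | [] => []
  | w :: ws => if p w && !(seen.contains w) then w :: ddP p (seen ++ [w]) ws else ddP p seen ws

-- A's lower accumulator in closed form: online dedup driven by both accumulators
def ALdd (u l : List String) : List String → List String
  | [] => []
  | w :: ws =>
    if w == PySem.Str.upper w && !(u.contains w) then ALdd (u ++ [w]) l ws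
    else if w == PySem.Str.lower w && !(l.contains w) then w :: ALdd u (l ++ [w]) ws
    else ALdd u l ws

lemma filter_foldl_add (p : String → Bool) :
    ∀ (ws s u : List String), (∀ v, p v = true → (v ∈ s ↔ v ∈ u)) →
    (List.foldl PySem.Set.add s ws).filter p = s.filter p ++ ddP p u ws := by
  intro ws
  induction ws with
  | nil => intro s u h; simp [ddP]
  | cons w ws ih =>
    intro s u h
    simp only [List.foldl_cons]
    by_cases hs : w ∈ s
    · have hadd : PySem.Set.add s w = s := by simp [PySem.Set.add, hs]
      rw [hadd]
      by_cases hp : p w = true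
      · have hu : w ∈ u := (h w hp).mp hs
        have : ddP p u (w :: ws) = ddP p u ws := by simp [ddP, hu]
        rw [this]; exact ih s u h
      · have : ddP p u (w :: ws) = ddP p u ws := by simp [ddP, hp]
        rw [this]; exact ih s u h
    · have hadd : PySem.Set.add s w = s ++ [w] := by simp [PySem.Set.add, hs]
      rw [hadd]
      by_cases hp : p w = true
      · have hu : w ∉ u := fun hu => hs ((h w hp).mpr hu)
        have hdd : ddP p u (w :: ws) = w :: ddP p (u ++ [w]) ws := by simp [ddP, hp, hu]
        rw [hdd, ih (s ++ [w]) (u ++ [w]) ?_]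
        · simp [List.filter_append, hp]
        · intro v hv
          simp only [List.mem_append, List.mem_singleton]
          rw [h v hv]
      · have hdd : ddP p u (w :: ws) = ddP p u ws := by simp [ddP, hp]
        rw [hdd, ih (s ++ [w]) u ?_]
        · simp [List.filter_append, hp]
        · intro v hv
          have hvw : v ≠ w := fun he => hp (he ▸ hv)
          simp only [List.mem_append, List.mem_singleton, hvw, or_false]
          exact h v hv

-- dict.fromkeys then filter = one-pass first-occurrence dedup of the p-elements
lemma dedup_filter (p : String → Bool) (xs : List String) :
    (PySem.List.dedup xs).filter p = ddP p [] xs := by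
  have h := filter_foldl_add p xs [] [] (by simp)
  simpa [PySem.List.dedup, PySem.Set.ofList] using h

lemma foldA_closed :
    ∀ (ws u l : List String),
    List.foldl splitCaseStepA (u, l) ws =
      (u ++ ddP (fun w => w == PySem.Str.upper w) u ws, l ++ ALdd u l ws) := by
  intro ws
  induction ws with
  | nil => intro u l; simp [ddP, ALdd]
  | cons w ws ih =>
    intro u l
    simp only [List.foldl_cons]
    by_cases h1 : (w == PySem.Str.upper w && !(u.contains w)) = true
    · have hstep : splitCaseStepA (u, l) w = (u ++ [w], l) := by
        simp only [splitCaseStepA, h1, if_pos]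
      have hc1 : w ∉ u := by simpa using (Bool.and_elim_right h1)
      have hb1 : (w == PySem.Str.upper w) = true := Bool.and_elim_left h1
      rw [hstep, ih (u ++ [w]) l]
      have hdd : ddP (fun w => w == PySem.Str.upper w) u (w :: ws)
          = w :: ddP (fun w => w == PySem.Str.upper w) (u ++ [w]) ws := by
        simp [ddP, hb1, hc1]
      have hal : ALdd u l (w :: ws) = ALdd (u ++ [w]) l ws := by
        simp [ALdd, hb1, hc1]
      rw [hdd, hal]
      simp
    · have hdd : ddP (fun w => w == PySem.Str.upper w) u (w :: ws)
          = ddP (fun w => w == PySem.Str.upper w) u ws := by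
        simp only [ddP]
        rw [if_neg (by simpa using h1)]
      by_cases h2 : (w == PySem.Str.lower w && !(l.contains w)) = true
      · have hstep : splitCaseStepA (u, l) w = (u, l ++ [w]) := by
          simp only [splitCaseStepA]
          rw [if_neg h1, if_pos h2]
        have hal : ALdd u l (w :: ws) = w :: ALdd u (l ++ [w]) ws := by
          simp only [ALdd]
          rw [if_neg h1, if_pos h2]
        rw [hstep, ih u (l ++ [w]), hdd, hal]
        simp
      · have hstep : splitCaseStepA (u, l) w = (u, l) := by
          simp only [splitCaseStepA]
          rw [if_neg h1, if_neg h2]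
        have hal : ALdd u l (w :: ws) = ALdd u l ws := by
          simp only [ALdd]
          rw [if_neg h1, if_neg h2]
        rw [hstep, ih u l, hdd, hal]

-- when no caseless word of the suffix sits in the upper accumulator or repeats,
-- A's lower accumulator is exactly the first-occurrence dedup of B's lower filter
lemma ALdd_eq_ddP :
    ∀ (ws u l : List String),
    (∀ v, v = PySem.Str.upper v → v = PySem.Str.lower v → v ∈ u → v ∉ ws) →
    (∀ v, v = PySem.Str.upper v → v = PySem.Str.lower v → ws.count v ≤ 1) →
    ALdd u l ws = ddP (fun w => w != PySem.Str.upper w && w == PySem.Str.lower w) l ws := by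
  intro ws
  induction ws with
  | nil => intro u l _ _; simp [ALdd, ddP]
  | cons w ws ih =>
    intro u l hU hC
    have hC' : ∀ v, v = PySem.Str.upper v → v = PySem.Str.lower v → ws.count v ≤ 1 := by
      intro v h1 h2
      have := hC v h1 h2
      have hle : ws.count v ≤ (w :: ws).count v := by
        by_cases hvw : w = v <;> simp [hvw]
      omega
    by_cases h1 : (w == PySem.Str.upper w && !(u.contains w)) = true
    · -- branch 1 of A: w goes to upper; B's lower filter rejects w (w == upper w)
      have hb1 : (w == PySem.Str.upper w) = true := Bool.and_elim_left h1
      have hb1' : w = PySem.Str.upper w := by simpa using hb1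
      have hal : ALdd u l (w :: ws) = ALdd (u ++ [w]) l ws := by
        simp only [ALdd]; rw [if_pos h1]
      have hnp : (w != PySem.Str.upper w) = false := by
        simp only [bne, hb1, Bool.not_true]
      have hdd : ddP (fun w => w != PySem.Str.upper w && w == PySem.Str.lower w) l (w :: ws)
          = ddP (fun w => w != PySem.Str.upper w && w == PySem.Str.lower w) l ws := by
        simp [ddP, hnp]
      rw [hal, hdd]
      refine ih (u ++ [w]) l (fun v hv1 hv2 hvmem => ?_) hC'
      rcases List.mem_append.mp hvmem with hvu | hvw
      · exact fun hmem => hU v hv1 hv2 hvu (List.mem_cons_of_mem _ hmem)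
      · -- v = w, caseless: then (w :: ws).count w ≤ 1 forces w ∉ ws
        have hvw' : v = w := by simpa using hvw
        subst hvw'
        intro hmem
        have := hC v hv1 hv2
        have : 2 ≤ (v :: ws).count v := by
          have : 1 ≤ ws.count v := List.one_le_count_iff.mpr hmem
          simp; omega
        omega
    · by_cases h2 : (w == PySem.Str.lower w && !(l.contains w)) = true
      · -- elif of A fires: w lower-eq, not yet in l; show w ≠ upper w, so B's filter keeps it
        have hb2 : (w == PySem.Str.lower w) = true := Bool.and_elim_left h2
        have hnl : w ∉ l := by simpa using Bool.and_elim_right h2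
        have hne : (w == PySem.Str.upper w) = false := by
          cases hx : (w == PySem.Str.upper w) with
          | false => rfl
          | true =>
            exfalso
            have hwu : w ∈ u := by
              by_contra hnu
              exact h1 (by simp [hx, hnu])
            exact hU w (by simpa using hx) (by simpa using hb2) hwu List.mem_cons_self
        have hal : ALdd u l (w :: ws) = w :: ALdd u (l ++ [w]) ws := by
          simp only [ALdd]
          rw [if_neg h1, if_pos h2]
        have hbne : (w != PySem.Str.upper w) = true := by
          simp only [bne, hne, Bool.not_false]
        have hdd : ddP (fun w => w != PySem.Str.upper w && w == PySem.Str.lower w) l (w :: ws)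
            = w :: ddP (fun w => w != PySem.Str.upper w && w == PySem.Str.lower w) (l ++ [w]) ws := by
          simp [ddP, hbne, hb2, hnl]
        rw [hal, hdd]
        exact congrArg (List.cons w)
          (ih u (l ++ [w]) (fun v hv1 hv2 hvu => hU v hv1 hv2 hvu ∘ List.mem_cons_of_mem _) hC')
      · -- neither branch of A fires; show B's deduped filter also skips w
        have hal : ALdd u l (w :: ws) = ALdd u l ws := by
          simp only [ALdd]
          rw [if_neg h1, if_neg h2]
        have hdd : ddP (fun w => w != PySem.Str.upper w && w == PySem.Str.lower w) l (w :: ws)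
            = ddP (fun w => w != PySem.Str.upper w && w == PySem.Str.lower w) l ws := by
          simp only [ddP]
          rw [if_neg ?_]
          intro hc
          have hpl : (w == PySem.Str.lower w) = true :=
            Bool.and_elim_right (Bool.and_elim_left hc)
          have hpu : (w != PySem.Str.upper w) = true :=
            Bool.and_elim_left (Bool.and_elim_left hc)
          have hnl : w ∉ l := by simpa using Bool.and_elim_right hc
          exact h2 (by simp [hpl, hnl])
        rw [hal, hdd]
        refine ih u l (fun v hv1 hv2 hvu => hU v hv1 hv2 hvu ∘ List.mem_cons_of_mem _) hC'

lemma split_case_closed (words : List String) :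
    split_case words
      = (ALdd [] [] words, ddP (fun w => w == PySem.Str.upper w) [] words) := by
  unfold split_case
  rw [foldA_closed words [] []]
  simp

lemma split_case_alt_closed (words : List String) :
    split_case_alt words
      = (ddP (fun w => w != PySem.Str.upper w && w == PySem.Str.lower w) [] words,
         ddP (fun w => w == PySem.Str.upper w) [] words) := by
  unfold split_case_alt
  dsimp only
  rw [dedup_filter, dedup_filter]

-- ===== VERDICT (by name: the statement is the Claim_ definition above) =====
theorem split_case_spec : Claim_equal_split_case := by
  intro words _ hpre
  unfold Spec_split_case
  rw [split_case_closed, split_case_alt_closed]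
  refine congrArg (fun x => (x, _)) ?_
  refine ALdd_eq_ddP words [] [] (by simp) ?_
  intro v h1 h2
  by_cases hmem : v ∈ words
  · exact hpre v hmem h1 h2
  · simp [List.count_eq_zero_of_not_mem hmem]
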